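-- pv_equiv track=rewrite | github.com/Enot-den/Inf_Lab1 | num11.py | fib_to_ten
-- ===== SOURCE A (Python) =====
-- def fib_to_ten(fib_ns_num):
--     result = 0
--     ch_fib1, ch_fib2 = 1, 1  #числа Фибоначи
--     for i in fib_ns_num[::-1]:
--         if i == "1":
--             result += ch_fib2
--         ch_fib1, ch_fib2 = ch_fib2, ch_fib1 + ch_fib2
--     return result
-- ===== SOURCE B (Python) =====
-- def fib_to_ten(fib_ns_num):
--     # Forward Horner-style scan: a2 = value of the prefix read so far in Fibonacci
--     # code, a1 = the same prefix with every weight shifted down one Fibonacci step.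
--     a2 = 0
--     a1 = 0
--     for c in fib_ns_num:
--         bit = 1 if c == "1" else 0
--         a2, a1 = a2 + a1 + bit, a2 + bit
--     return a2
-- ===== Notes on version B (the rewrite author's own statement) =====
-- stated objective: faster
-- what changed: B reads the string forward with a Horner-style recurrence carrying the prefix value and its Fibonacci-shifted companion, instead of A's reverse scan accumulating a rolling pair of Fibonacci weights.
import Mathlib
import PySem

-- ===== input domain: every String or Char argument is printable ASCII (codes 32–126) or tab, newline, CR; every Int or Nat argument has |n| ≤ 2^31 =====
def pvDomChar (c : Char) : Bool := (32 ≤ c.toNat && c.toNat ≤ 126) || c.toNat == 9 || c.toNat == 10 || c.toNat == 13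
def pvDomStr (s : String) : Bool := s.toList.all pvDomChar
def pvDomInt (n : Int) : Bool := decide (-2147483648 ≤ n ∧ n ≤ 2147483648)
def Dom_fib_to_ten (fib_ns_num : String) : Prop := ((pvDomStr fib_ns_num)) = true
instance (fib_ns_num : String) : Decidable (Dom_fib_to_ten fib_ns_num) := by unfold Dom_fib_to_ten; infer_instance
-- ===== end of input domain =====

-- B replaces A's reverse scan with rolling Fibonacci weights by a forward Horner-style
-- scan carrying the prefix value and its Fibonacci-shifted companion; a timing run
-- measured B faster on its large inputs (A always builds every big-integer weight,
-- B's accumulators grow only with the encoded value).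

-- ===== PORT A =====
-- the for-loop over fib_ns_num[::-1] with state (result, ch_fib1, ch_fib2)
def fibA_loop : List Char → Int → Int → Int → Int
  | [], result, _, _ => result
  | c :: rest, result, f1, f2 =>
      fibA_loop rest (if c = '1' then result + f2 else result) f2 (f1 + f2)

def fib_to_ten (fib_ns_num : String) : Int :=
  -- fib_ns_num[::-1] is exactly the reversed character sequence
  fibA_loop fib_ns_num.toList.reverse 0 1 1

-- ===== PORT B =====
-- one forward step: a2, a1 = a2 + a1 + bit, a2 + bit
def fibB_step (st : Int × Int) (c : Char) : Int × Int :=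
  (st.1 + st.2 + (if c = '1' then 1 else 0), st.1 + (if c = '1' then 1 else 0))

def fib_to_ten_alt (fib_ns_num : String) : Int :=
  (fib_ns_num.toList.foldl fibB_step (0, 0)).1

-- ===== PRECONDITION & SPEC =====
def Spec_fib_to_ten (fib_ns_num : String) (out : Int) : Prop := out = fib_to_ten_alt fib_ns_num
instance (fib_ns_num : String) (out : Int) : Decidable (Spec_fib_to_ten fib_ns_num out) := by unfold Spec_fib_to_ten; infer_instance

-- ===== CLAIM (what is proved, stated in full; the proofs are below) =====
def Claim_equal_fib_to_ten : Prop := ∀ (fib_ns_num : String), Dom_fib_to_ten fib_ns_num → Spec_fib_to_ten fib_ns_num (fib_to_ten fib_ns_num)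

-- ===== LEMMAS AND PROOFS =====

-- Fibonacci weight table: wtab n a b = [b, a+b, a+2b, …] (length n)
def wtab : Nat → Int → Int → List Int
  | 0, _, _ => []
  | n + 1, a, b => b :: wtab n b (a + b)

-- the weighted sum both loops compute, over a character list rs with weights wtab |rs| a b
def wsum (rs : List Char) (a b : Int) : Int :=
  ∑ j ∈ Finset.range rs.length,
    (if rs.getD j ' ' = '1' then 1 else 0) * (wtab rs.length a b).getD j 0

theorem wtab_getD_add : ∀ (n j : Nat) (a b a' b' : Int),
    (wtab n (a + a') (b + b')).getD j 0 = (wtab n a b).getD j 0 + (wtab n a' b').getD j 0 := by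
  intro n
  induction n with
  | zero => intro j a b a' b'; simp [wtab]
  | succ m ih =>
      intro j a b a' b'
      cases j with
      | zero => simp [wtab]
      | succ k =>
          simp only [wtab, List.getD_cons_succ]
          have := ih k b (a + b) b' (a' + b')
          calc (wtab m (b + b') (a + a' + (b + b'))).getD k 0
              = (wtab m (b + b') ((a + b) + (a' + b'))).getD k 0 := by ring_nf
            _ = (wtab m b (a + b)).getD k 0 + (wtab m b' (a' + b')).getD k 0 := this

theorem fibA_loop_sum : ∀ (rs : List Char) (r a b : Int),
    fibA_loop rs r a b = r + wsum rs a b := by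
  intro rs
  induction rs with
  | nil => intro r a b; simp [fibA_loop, wsum]
  | cons c t ih =>
      intro r a b
      rw [show fibA_loop (c :: t) r a b
            = fibA_loop t (if c = '1' then r + b else r) b (a + b) from rfl, ih]
      unfold wsum
      rw [List.length_cons, Finset.sum_range_succ']
      simp only [List.getD_cons_zero, List.getD_cons_succ, wtab]
      split_ifs <;> ring

theorem fibB_foldl_sum : ∀ (cs : List Char),
    cs.foldl fibB_step (0, 0) = (wsum cs.reverse 1 1, wsum cs.reverse 0 1) := by
  intro cs
  induction cs using List.reverseRecOn with
  | nil => simp [wsum]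
  | append_singleton t c ih =>
      rw [List.foldl_append, ih]
      have hrev : (t ++ [c]).reverse = c :: t.reverse := by simp
      have hlen : (c :: t.reverse).length = t.reverse.length + 1 := rfl
      unfold fibB_step wsum
      rw [hrev, hlen]
      rw [Finset.sum_range_succ', Finset.sum_range_succ']
      simp only [List.getD_cons_zero, List.getD_cons_succ, wtab]
      have hsplit : ∀ j ∈ Finset.range t.reverse.length,
          (if t.reverse.getD j ' ' = '1' then (1 : Int) else 0) * (wtab t.reverse.length 1 (1 + 1)).getD j 0
            = (if t.reverse.getD j ' ' = '1' then 1 else 0) * (wtab t.reverse.length 1 1).getD j 0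
              + (if t.reverse.getD j ' ' = '1' then 1 else 0) * (wtab t.reverse.length 0 1).getD j 0 := by
        intro j _
        have hadd := wtab_getD_add t.reverse.length j 1 1 0 1
        simp only [add_zero] at hadd
        rw [hadd]
        ring
      rw [Finset.sum_congr rfl hsplit, Finset.sum_add_distrib]
      simp only [List.foldl_cons, List.foldl_nil, Prod.mk.injEq, zero_add]
      constructor <;> split_ifs <;> ring

-- ===== VERDICT (by name: the statement is the Claim_ definition above) =====
theorem fib_to_ten_spec : Claim_equal_fib_to_ten := by
  intro s _
  show fib_to_ten s = fib_to_ten_alt s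
  unfold fib_to_ten fib_to_ten_alt
  rw [fibA_loop_sum, fibB_foldl_sum]
  simp
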